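-- pv_equiv track=rewrite | github.com/mikeyhasson/Intro-to-CS | ex8/nonogram.py | block_ok
-- ===== SOURCE A (Python) =====
-- WHITE = 0
--
-- BLACK = 1
--
-- def block_ok(row, blocks_list):
--     """
--     This function recieves a nonogram row and a blocks_list and checks if the row matches the constraints
--     :param row: nonogram row
--     :param blocks_list: block constraints
--     :return: True if row matches constraints, else, False
--     """
--     i = 0
--     block_index = -1
--     while BLACK in row[i:]:
--         i=row.index(BLACK,i)
--         if WHITE in row[i:]:
--             j=row.index(WHITE,i)
--         else:
--             j=len(row)
--         block_index+=1
--         if block_index > len(blocks_list) -1: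
--             return False
--         if not j-i==blocks_list[block_index]:
--             return False
--         i=j
--     return True
-- ===== SOURCE B (Python) =====
-- WHITE = 0
--
-- BLACK = 1
--
-- def block_ok(row, blocks_list):
--     """Single left-to-right pass: collect black-run lengths, compare to the prefix of blocks_list."""
--     runs = []
--     current = None  # length of the run in progress, or None
--     for cell in row:
--         if cell == WHITE:
--             if current is not None:
--                 runs.append(current)
--                 current = None
--         elif cell == BLACK and current is None:
--             current = 1
--         elif current is not None:
--             current += 1
--     if current is not None:
--         runs.append(current)
--     return runs == blocks_list[:len(runs)]
-- ===== Notes on version B (the rewrite author's own statement) =====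
-- stated objective: alternative
-- what changed: A rescans with row[i:] slices plus list.index/in for every block; B makes one explicit left-to-right pass over the row collecting black-run lengths and compares them with the matching prefix of blocks_list.
import Mathlib
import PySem

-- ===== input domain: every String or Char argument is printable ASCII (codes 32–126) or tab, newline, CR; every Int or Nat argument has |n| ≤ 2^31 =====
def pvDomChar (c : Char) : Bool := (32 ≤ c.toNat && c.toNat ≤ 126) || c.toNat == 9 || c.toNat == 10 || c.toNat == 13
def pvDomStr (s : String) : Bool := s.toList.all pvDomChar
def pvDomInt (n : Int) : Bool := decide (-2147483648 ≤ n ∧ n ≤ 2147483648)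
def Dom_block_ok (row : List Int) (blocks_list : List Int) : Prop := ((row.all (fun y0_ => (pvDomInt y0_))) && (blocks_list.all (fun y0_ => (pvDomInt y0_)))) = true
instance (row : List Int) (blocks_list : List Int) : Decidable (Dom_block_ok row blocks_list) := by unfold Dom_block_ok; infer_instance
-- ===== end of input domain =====

-- B replaces A's repeated slicing/index scans by one left-to-right pass that collects the
-- black-run lengths and compares them with the corresponding prefix of blocks_list (objective: alternative).

-- ===== PORT A =====
-- A's while loop, state (i, block_index); fuel row.length + 1 suffices because i strictly
-- increases each iteration and stays ≤ row.length (the fuel-0 branch is never reached).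
-- row.index(BLACK, i) is transliterated as i + row[i:].index(BLACK) (equal in Python for 0 ≤ i,
-- and i ≥ 0 throughout A's loop); the membership guards ensure index? is `some` and
-- blocks_list[block_index] is in range, so .getD 0 / pyGetD never supply their default.
def blockLoop (row blocks_list : List Int) : Nat → Int → Int → Bool
  | 0, _, _ => true
  | fuel+1, i, block_index =>
    let tail := PySem.List.slice row (some i) none
    if (1:Int) ∈ tail then
      let i' := i + (((PySem.List.index? tail 1).getD 0 : Nat) : Int)
      let tail' := PySem.List.slice row (some i') none
      let j := if (0:Int) ∈ tail' then i' + (((PySem.List.index? tail' 0).getD 0 : Nat) : Int)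
               else (row.length : Int)
      let bi := block_index + 1
      if bi > (blocks_list.length : Int) - 1 then false
      else if ¬ (j - i' = PySem.List.pyGetD blocks_list bi 0) then false
      else blockLoop row blocks_list fuel j bi
    else true

def block_ok (row : List Int) (blocks_list : List Int) : Bool :=
  blockLoop row blocks_list (row.length + 1) 0 (-1)

-- ===== PORT B =====
-- loop body of Source B: state = (runs so far, current run length or none)
def bStep (st : List Int × Option Int) (cell : Int) : List Int × Option Int :=
  if cell = 0 then
    match st.2 with
    | some k => (st.1 ++ [k], none)
    | none => st
  else if cell = 1 ∧ st.2 = none then (st.1, some 1)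
  else
    match st.2 with
    | some k => (st.1, some (k+1))
    | none => st

-- trailing "if current is not None: runs.append(current)"
def bFin (st : List Int × Option Int) : List Int :=
  match st.2 with
  | some k => st.1 ++ [k]
  | none => st.1

def block_ok_alt (row : List Int) (blocks_list : List Int) : Bool :=
  let runs := bFin (row.foldl bStep ([], none))
  decide (runs = PySem.List.slice blocks_list none (some ((runs.length : Nat) : Int)))

-- ===== PRECONDITION & SPEC =====
def Spec_block_ok (row : List Int) (blocks_list : List Int) (out : Bool) : Prop := out = block_ok_alt row blocks_list
instance (row : List Int) (blocks_list : List Int) (out : Bool) : Decidable (Spec_block_ok row blocks_list out) := by unfold Spec_block_ok; infer_instance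

-- ===== CLAIM (what is proved, stated in full; the proofs are below) =====
def Claim_equal_block_ok : Prop := ∀ (row : List Int) (blocks_list : List Int), Dom_block_ok row blocks_list → Spec_block_ok row blocks_list (block_ok row blocks_list)

-- ===== LEMMAS AND PROOFS =====

-- The common specification: the list of black-run lengths, in A's semantics (a run starts at the
-- first BLACK after a WHITE/the start and extends to the next WHITE or to the end of the row).
mutual
def runsW : List Int → List Int
  | [] => []
  | x :: xs => if x = 1 then runsB 1 xs else runsW xs
def runsB (k : Int) : List Int → List Int
  | [] => [k]
  | x :: xs => if x = 0 then k :: runsW xs else runsB (k+1) xs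
end

theorem runsW_of_not_mem (l : List Int) (h : (1:Int) ∉ l) : runsW l = [] := by
  induction l with
  | nil => rfl
  | cons x xs ih =>
    simp only [List.mem_cons, not_or] at h
    simp [runsW, Ne.symm h.1, ih h.2]

theorem runsW_append (pre suf : List Int) (h : (1:Int) ∉ pre) :
    runsW (pre ++ 1 :: suf) = runsB 1 suf := by
  induction pre with
  | nil => simp [runsW]
  | cons x xs ih =>
    simp only [List.mem_cons, not_or] at h
    simp [runsW, Ne.symm h.1, ih h.2]

theorem runsB_of_not_mem (l : List Int) (k : Int) (h : (0:Int) ∉ l) :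
    runsB k l = [k + (l.length : Int)] := by
  induction l generalizing k with
  | nil => simp [runsB]
  | cons x xs ih =>
    simp only [List.mem_cons, not_or] at h
    simp [runsB, Ne.symm h.1, ih _ h.2]
    ring

theorem runsB_append (pre suf : List Int) (k : Int) (h : (0:Int) ∉ pre) :
    runsB k (pre ++ 0 :: suf) = (k + (pre.length : Int)) :: runsW suf := by
  induction pre generalizing k with
  | nil => simp [runsB]
  | cons x xs ih =>
    simp only [List.mem_cons, not_or] at h
    simp [runsB, Ne.symm h.1, ih _ h.2]
    ring

-- B's fold computes the run list.
theorem foldl_bStep (l : List Int) : ∀ acc : List Int,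
    bFin (l.foldl bStep (acc, none)) = acc ++ runsW l ∧
    ∀ k, bFin (l.foldl bStep (acc, some k)) = acc ++ runsB k l := by
  induction l with
  | nil => intro acc; simp [bFin, runsW, runsB]
  | cons x xs ih =>
    intro acc
    constructor
    · by_cases h0 : x = 0
      · subst h0; simpa [bStep, runsW] using (ih acc).1
      · by_cases h1 : x = 1
        · subst h1; simpa [bStep, runsW] using (ih acc).2 1
        · simpa [bStep, runsW, h0, h1] using (ih acc).1
    · intro k
      by_cases h0 : x = 0
      · subst h0
        have := (ih (acc ++ [k])).1
        simp only [List.foldl_cons, bStep] at *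
        simp [this, runsB]
      · by_cases h1 : x = 1
        · subst h1; simpa [bStep, runsB, h0] using (ih acc).2 (k+1)
        · simpa [bStep, runsB, h0, h1] using (ih acc).2 (k+1)

theorem block_ok_alt_eq (row blocks_list : List Int) :
    block_ok_alt row blocks_list
      = decide (runsW row = blocks_list.take (runsW row).length) := by
  have h := (foldl_bStep row []).1
  simp only [List.nil_append] at h
  simp [block_ok_alt, h, PySem.List.slice_to_natCast]

-- A's loop, at absolute position n with b blocks already consumed, decides whether the
-- remaining runs equal the corresponding prefix of the remaining blocks.
theorem blockLoop_eq (row blocks_list : List Int) :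
    ∀ (fuel n b : Nat), n ≤ row.length → row.length - n < fuel →
    blockLoop row blocks_list fuel (n : Int) ((b : Int) - 1)
      = decide (runsW (row.drop n)
          = (blocks_list.drop b).take (runsW (row.drop n)).length) := by
  intro fuel
  induction fuel with
  | zero => intro n b hn hf; omega
  | succ F ih =>
    intro n b hn hf
    rw [blockLoop]
    simp only [PySem.List.slice_from_natCast]
    by_cases h1 : (1:Int) ∈ row.drop n
    case neg =>
      rw [if_neg h1, runsW_of_not_mem _ h1]
      simp
    case pos =>
      rw [if_pos h1]
      obtain ⟨p, hp⟩ := Option.isSome_iff_exists.mp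
        ((PySem.List.index?_isSome_iff _ _).mpr h1)
      obtain ⟨pre, suf, hdrop, hplen, hpre⟩ := (PySem.List.index?_eq_some_iff _ _ _).mp hp
      rw [hp]
      have hlen : row.length - n = pre.length + 1 + suf.length := by
        have := congrArg List.length hdrop
        simp [List.length_drop] at this; omega
      have hdrop2 : row.drop (n + p) = 1 :: suf := by
        have : row.drop (n + p) = (row.drop n).drop p := (List.drop_drop ..).symm
        rw [this, hdrop, ← hplen, List.drop_left]
      have hcast : (n : Int) + (p : Int) = ((n + p : Nat) : Int) := by push_cast; ring
      simp only [Option.getD_some, hcast, PySem.List.slice_from_natCast, hdrop2]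
      have hmem01 : ((0:Int) ∈ (1:Int) :: suf) ↔ (0:Int) ∈ suf := by simp
      have hrw : runsW (row.drop n) = runsB 1 suf := by
        rw [hdrop, runsW_append _ _ hpre]
      by_cases h0 : (0:Int) ∈ suf
      case pos =>
        rw [if_pos (hmem01.mpr h0)]
        obtain ⟨q, hq⟩ := Option.isSome_iff_exists.mp
          ((PySem.List.index?_isSome_iff _ _).mpr h0)
        obtain ⟨pre2, suf2, hsuf, hqlen, hpre2⟩ := (PySem.List.index?_eq_some_iff _ _ _).mp hq
        rw [PySem.List.index?_cons_of_ne suf (show (1:Int) ≠ 0 by norm_num), hq]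
        have hruns : runsW (row.drop n) = (1 + (q : Int)) :: runsW suf2 := by
          rw [hrw, hsuf, runsB_append _ _ _ hpre2, hqlen]
        have hslen : suf.length = q + 1 + suf2.length := by
          have := congrArg List.length hsuf
          simp at this; omega
        simp only [Option.map_some, Option.getD_some]
        by_cases hb : ((b : Int) - 1) + 1 > (blocks_list.length : Int) - 1
        case pos =>
          rw [if_pos hb]
          have hbl : blocks_list.length ≤ b := by omega
          rw [List.drop_eq_nil_of_le hbl, hruns]
          simp
        case neg =>
          rw [if_neg hb]
          have hblt : b < blocks_list.length := by omega
          have hbi : ((b : Int) - 1) + 1 = ((b : Nat) : Int) := by ring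
          rw [hbi, PySem.List.pyGetD_natCast, List.getD_eq_getElem _ _ hblt]
          have hdropb : blocks_list.drop b = blocks_list[b] :: blocks_list.drop (b + 1) :=
            List.drop_eq_getElem_cons hblt
          have harith : ((n + p : Nat) : Int) + ((q + 1 : Nat) : Int) - ((n + p : Nat) : Int)
              = 1 + (q : Int) := by push_cast; ring
          by_cases hval : (1 + (q : Int)) = blocks_list[b]
          case neg =>
            rw [if_pos (show ¬ _ = blocks_list[b] by rw [harith]; exact hval)]
            rw [hruns, hdropb]
            symm
            simp only [List.length_cons, List.take_succ_cons, decide_eq_false_iff_not]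
            intro hcontra
            exact hval (List.cons_eq_cons.mp hcontra).1
          case pos =>
            rw [if_neg (show ¬ ¬ _ = blocks_list[b] by rw [harith]; exact not_not_intro hval)]
            have hcast2 : ((n + p : Nat) : Int) + ((q + 1 : Nat) : Int)
                = ((n + p + (q + 1) : Nat) : Int) := by push_cast; ring
            have hbi2 : ((b : Nat) : Int) = ((b + 1 : Nat) : Int) - 1 := by push_cast; ring
            rw [hcast2, hbi2, ih (n + p + (q + 1)) (b + 1) (by omega) (by omega)]
            have hdrop3 : row.drop (n + p + (q + 1)) = 0 :: suf2 := by
              have e1 : row.drop (n + p + (q + 1)) = (row.drop (n + p)).drop (q + 1) := by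
                rw [List.drop_drop]
              rw [e1, hdrop2, List.drop_succ_cons, hsuf, ← hqlen, List.drop_left]
            rw [hdrop3]
            have hrw2 : runsW ((0:Int) :: suf2) = runsW suf2 := by simp [runsW]
            rw [hrw2, hruns, hdropb]
            simp only [List.length_cons, List.take_succ_cons, decide_eq_decide]
            rw [List.cons_eq_cons]
            simp [hval]
      case neg =>
        rw [if_neg (show ¬ ((0:Int) ∈ (1:Int) :: suf) by simpa using h0)]
        have hruns : runsW (row.drop n) = [1 + (suf.length : Int)] := by
          rw [hrw, runsB_of_not_mem _ _ h0]
        by_cases hb : ((b : Int) - 1) + 1 > (blocks_list.length : Int) - 1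
        case pos =>
          rw [if_pos hb]
          have hbl : blocks_list.length ≤ b := by omega
          rw [List.drop_eq_nil_of_le hbl, hruns]
          simp
        case neg =>
          rw [if_neg hb]
          have hblt : b < blocks_list.length := by omega
          have hbi : ((b : Int) - 1) + 1 = ((b : Nat) : Int) := by ring
          rw [hbi, PySem.List.pyGetD_natCast, List.getD_eq_getElem _ _ hblt]
          have hdropb : blocks_list.drop b = blocks_list[b] :: blocks_list.drop (b + 1) :=
            List.drop_eq_getElem_cons hblt
          have harith : (row.length : Int) - ((n + p : Nat) : Int) = 1 + (suf.length : Int) := by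
            push_cast; omega
          by_cases hval : (1 + (suf.length : Int)) = blocks_list[b]
          case neg =>
            rw [if_pos (show ¬ _ = blocks_list[b] by rw [harith]; exact hval)]
            rw [hruns, hdropb]
            symm
            simp only [List.length_cons, List.length_nil, List.take_succ_cons, List.take_zero,
              decide_eq_false_iff_not]
            intro hcontra
            exact hval (List.cons_eq_cons.mp hcontra).1
          case pos =>
            rw [if_neg (show ¬ ¬ _ = blocks_list[b] by rw [harith]; exact not_not_intro hval)]
            have hbi2 : ((b : Nat) : Int) = ((b + 1 : Nat) : Int) - 1 := by push_cast; ring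
            rw [hbi2, ih row.length (b + 1) (by omega) (by omega)]
            rw [List.drop_length, hruns, hdropb]
            have h0s : runsW ([] : List Int) = [] := rfl
            rw [h0s]
            simp only [List.length_nil, List.take_zero, List.length_cons,
              List.take_succ_cons, decide_eq_decide]
            simp [hval]

-- ===== VERDICT (by name: the statement is the Claim_ definition above) =====
theorem block_ok_spec : Claim_equal_block_ok := by
  intro row blocks_list _
  unfold Spec_block_ok
  have h := blockLoop_eq row blocks_list (row.length + 1) 0 0 (by omega) (by omega)
  simp only [Nat.cast_zero, List.drop_zero] at h
  rw [block_ok_alt_eq]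
  show blockLoop row blocks_list (row.length + 1) 0 (-1) = _
  simpa using h
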